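-- pv_equiv track=rewrite | github.com/ZigaStrgar/programiranje1 | P9/vaje/vaja_9.py | nic_ena
-- ===== SOURCE A (Python) =====
-- def nic_ena(xs):
--     i = 0
--     prev = xs[0]
--     sez = []
--     vs = 0
--     while i < len(xs):
--         if prev != xs[i]:
--             sez.append(vs)
--             vs = 1
--             prev = xs[i]
--         else:
--             vs += 1
--         i += 1
--     sez.append(vs)
--     numb = sum([sez[x] for x in range(2, len(sez), 2)]) - sez[0]
--     if numb < sum([sez[x] for x in range(1, len(sez)-1, 2)]) - sez[len(sez)-1]:
--         return numb
--     else: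
--         return sum([sez[x] for x in range(1, len(sez)-1, 2)]) - sez[len(sez)-1]
--     return None
-- ===== SOURCE B (Python) =====
-- def nic_ena(xs):
--     prev = xs[0]
--     total_even = 0   # sum of run lengths at even run indices
--     total_odd = 0    # sum of run lengths at odd run indices
--     first = None     # length of the first run
--     last = 0         # length of the most recently closed run
--     run = 0          # length of the current (open) run
--     m = 0            # number of closed runs
--     for x in xs:
--         if x != prev:
--             if m % 2 == 0:
--                 total_even += run
--             else:
--                 total_odd += run
--             if first is None:
--                 first = run
--             m += 1
--             prev = x
--             run = 1
--         else:
--             run += 1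
--     # close the final run
--     if m % 2 == 0:
--         total_even += run
--     else:
--         total_odd += run
--     if first is None:
--         first = run
--     last = run
--     m += 1
--     numb = total_even - 2 * first
--     other = total_odd - (2 * last if (m - 1) % 2 == 1 else last)
--     return min(numb, other)
-- ===== Notes on version B (the rewrite author's own statement) =====
-- stated objective: faster
-- what changed: Replaces A's run-length list construction plus two index-comprehension passes over it by a single left-to-right pass that accumulates parity-split run-length totals, the first/last run lengths and the run count, computing the two candidate sums directly.
import Mathlib
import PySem

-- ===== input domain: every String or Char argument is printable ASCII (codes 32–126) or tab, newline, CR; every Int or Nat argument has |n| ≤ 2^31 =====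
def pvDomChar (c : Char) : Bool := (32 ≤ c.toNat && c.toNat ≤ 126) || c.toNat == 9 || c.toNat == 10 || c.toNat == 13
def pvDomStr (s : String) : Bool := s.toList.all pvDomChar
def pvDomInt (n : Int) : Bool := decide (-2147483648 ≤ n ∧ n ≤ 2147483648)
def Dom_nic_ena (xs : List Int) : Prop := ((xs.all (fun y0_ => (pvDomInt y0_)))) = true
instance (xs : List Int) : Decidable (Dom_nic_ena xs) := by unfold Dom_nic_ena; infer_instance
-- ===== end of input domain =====

-- B replaces A's run-length list + two index-comprehension passes by a single pass
-- accumulating parity-split run-length totals in one pass (objective: faster, measured constant-factor).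

-- ===== PORT A =====
-- A's while loop over i < len(xs): state (sez, vs), prev carried separately.
def nic_ena_aloop : List Int → Int → List Int → Int → List Int × Int
  | [], _, sez, vs => (sez, vs)
  | x :: rest, prev, sez, vs =>
    if prev ≠ x then nic_ena_aloop rest x (sez ++ [vs]) 1
    else nic_ena_aloop rest prev sez (vs + 1)

-- sum([sez[x] for x in range(a, b, 2)])
def nic_ena_sum2 (sez : List Int) (a b : Int) : Int :=
  ((PySem.List.pyRange a b 2).map (fun x => PySem.List.pyGetD sez x 0)).sum

def nic_ena (xs : List Int) : Int :=
  match xs with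
  | [] => 0   -- unreachable: the first-element access raises IndexError, excluded by Pre_
  | x0 :: _ =>
    let st := nic_ena_aloop xs x0 [] 0
    let sez := st.1 ++ [st.2]
    let n : Int := sez.length
    let numb := nic_ena_sum2 sez 2 n - PySem.List.pyGetD sez 0 0
    let other := nic_ena_sum2 sez 1 (n - 1) - PySem.List.pyGetD sez (n - 1) 0
    if numb < other then numb else other

-- ===== PORT B =====
-- B's for loop: state (total_even, total_odd, first, run, m), prev carried separately.
def nic_ena_bloop : List Int → Int → Int × Int × Option Int × Int × Int →
    Int × Int × Option Int × Int × Int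
  | [], _, st => st
  | x :: rest, prev, (te, tacc, first, run, m) =>
    if x ≠ prev then
      nic_ena_bloop rest x
        ((if PySem.Int.mod m 2 = 0 then te + run else te),
         (if PySem.Int.mod m 2 = 0 then tacc else tacc + run),
         (if first.isNone then some run else first),
         1, m + 1)
    else nic_ena_bloop rest prev (te, tacc, first, run + 1, m)

def nic_ena_alt (xs : List Int) : Int :=
  match xs with
  | [] => 0   -- unreachable: the first-element access raises IndexError, excluded by Pre_
  | x0 :: _ =>
    let st := nic_ena_bloop xs x0 (0, 0, none, 0, 0)
    let te := st.1; let tacc := st.2.1; let first := st.2.2.1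
    let run := st.2.2.2.1; let m0 := st.2.2.2.2
    -- close the final run
    let te' := if PySem.Int.mod m0 2 = 0 then te + run else te
    let tacc' := if PySem.Int.mod m0 2 = 0 then tacc else tacc + run
    let first' := first.getD run
    let last := run
    let m := m0 + 1
    let numb := te' - 2 * first'
    let other := tacc' - (if PySem.Int.mod (m - 1) 2 = 1 then 2 * last else last)
    min numb other

-- ===== PRECONDITION & SPEC =====
-- Pre_ excludes only the empty list, on which A raises IndexError at its initial first-element access.
def Pre_nic_ena (xs : List Int) : Prop := xs ≠ []
instance (xs : List Int) : Decidable (Pre_nic_ena xs) := by unfold Pre_nic_ena; infer_instance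
def pvWitness_nic_ena : List Int := [1, 1, 2]

def Spec_nic_ena (xs : List Int) (out : Int) : Prop := out = nic_ena_alt xs
instance (xs : List Int) (out : Int) : Decidable (Spec_nic_ena xs out) := by unfold Spec_nic_ena; infer_instance

-- ===== CLAIM (what is proved, stated in full; the proofs are below) =====
def Claim_equal_nic_ena : Prop := ∀ (xs : List Int), Dom_nic_ena xs → Pre_nic_ena xs → Spec_nic_ena xs (nic_ena xs)

-- ===== LEMMAS AND PROOFS =====

-- sum of the elements at even indices
def sumE : List Int → Int
  | [] => 0
  | [x] => x
  | x :: _ :: l => x + sumE l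

lemma sumE_cons (x : Int) (l : List Int) : sumE (x :: l) = x + sumE l.tail := by
  cases l <;> simp [sumE]

lemma sumE_append (l : List Int) (v : Int) :
    sumE (l ++ [v]) = if l.length % 2 = 0 then sumE l + v else sumE l := by
  induction l using sumE.induct with
  | case1 => simp [sumE]
  | case2 x => simp [sumE]
  | case3 x y l ih =>
    simp only [sumE, List.cons_append, List.length_cons]
    rw [ih]
    have h2 : (l.length + 1 + 1) % 2 = l.length % 2 := by omega
    rw [h2]; split_ifs <;> ring

lemma sumO_append (l : List Int) (v : Int) :
    sumE (l ++ [v]).tail = if l.length % 2 = 1 then sumE l.tail + v else sumE l.tail := by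
  cases l with
  | nil => simp [sumE]
  | cons h t => simp [sumE_append t v, Nat.add_mod]; split_ifs with h1 h2 h3 <;> omega

lemma mod_two_natCast (n : Nat) : PySem.Int.mod (n : Int) 2 = ((n % 2 : Nat) : Int) := by
  rw [PySem.Int.mod_eq_emod_of_pos (by norm_num)]
  omega

lemma pyR2_nil (a b : Int) (h : b ≤ a) : PySem.List.pyRange a b 2 = [] := by
  rw [PySem.List.pyRange_of_pos a b (by norm_num)]
  simp [not_lt.mpr h]

lemma pyR2_cons (a b : Int) (h : a < b) :
    PySem.List.pyRange a b 2 = a :: PySem.List.pyRange (a + 2) b 2 := by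
  rw [PySem.List.pyRange_of_pos a b (by norm_num),
      PySem.List.pyRange_of_pos (a + 2) b (by norm_num)]
  by_cases h2 : a + 2 < b
  · have hN : ((b - a + 2 - 1) / 2).toNat = ((b - (a + 2) + 2 - 1) / 2).toNat + 1 := by omega
    rw [if_pos h, if_pos h2, hN, List.range_succ_eq_map]
    simp only [List.map_cons, List.map_map]
    refine List.cons_eq_cons.mpr ⟨by simp, ?_⟩
    apply List.map_congr_left
    intro k _
    simp only [Function.comp]
    push_cast; ring
  · have hN : ((b - a + 2 - 1) / 2).toNat = 1 := by omega
    rw [if_pos h, if_neg h2, hN]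
    simp

-- the range-2 sum from index k is the even-index sum of the k-dropped list
lemma sum2_drop (fuel : Nat) : ∀ (sez : List Int) (k : Nat), sez.length ≤ k + fuel →
    nic_ena_sum2 sez (k : Int) (sez.length : Int) = sumE (sez.drop k) := by
  induction fuel with
  | zero =>
    intro sez k hk
    rw [nic_ena_sum2, pyR2_nil _ _ (by exact_mod_cast hk),
        List.drop_eq_nil_of_le (by omega)]
    simp [sumE]
  | succ f ih =>
    intro sez k hk
    by_cases hlt : k < sez.length
    · rw [nic_ena_sum2, pyR2_cons _ _ (by exact_mod_cast hlt)]
      have h2 : ((k : Int) + 2) = ((k + 2 : Nat) : Int) := by push_cast; ring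
      rw [List.map_cons, List.sum_cons, h2]
      have := ih sez (k + 2) (by omega)
      rw [nic_ena_sum2] at this
      rw [this]
      rw [PySem.List.pyGetD_eq_getElem sez 0 (by positivity) (by exact_mod_cast hlt)]
      have hd : sez.drop k = sez[k] :: sez.drop (k + 1) := List.drop_eq_getElem_cons hlt
      rw [hd, sumE_cons, List.tail_drop]
      simp
    · rw [nic_ena_sum2, pyR2_nil _ _ (by exact_mod_cast Nat.le_of_not_lt hlt)]
      simp [List.drop_eq_nil_of_le (Nat.le_of_not_lt hlt), sumE]

-- the two loops run in lockstep
lemma loops_agree (l : List Int) : ∀ (prev : Int) (sez : List Int) (vs : Int),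
    nic_ena_bloop l prev (sumE sez, sumE sez.tail, sez.head?, vs, (sez.length : Int)) =
      (sumE (nic_ena_aloop l prev sez vs).1,
       sumE (nic_ena_aloop l prev sez vs).1.tail,
       (nic_ena_aloop l prev sez vs).1.head?,
       (nic_ena_aloop l prev sez vs).2,
       ((nic_ena_aloop l prev sez vs).1.length : Int)) := by
  induction l with
  | nil => intro prev sez vs; simp [nic_ena_bloop, nic_ena_aloop]
  | cons x rest ih =>
    intro prev sez vs
    by_cases h : prev = x
    · subst h
      rw [show nic_ena_aloop (prev :: rest) prev sez vs
            = nic_ena_aloop rest prev sez (vs + 1) by simp [nic_ena_aloop],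
          show nic_ena_bloop (prev :: rest) prev (sumE sez, sumE sez.tail, sez.head?, vs, (sez.length : Int))
            = nic_ena_bloop rest prev (sumE sez, sumE sez.tail, sez.head?, vs + 1, (sez.length : Int)) by
            simp [nic_ena_bloop]]
      exact ih prev sez (vs + 1)
    · rw [show nic_ena_aloop (x :: rest) prev sez vs
            = nic_ena_aloop rest x (sez ++ [vs]) 1 by simp [nic_ena_aloop, h],
          show nic_ena_bloop (x :: rest) prev (sumE sez, sumE sez.tail, sez.head?, vs, (sez.length : Int))
            = nic_ena_bloop rest x
                ((if PySem.Int.mod (sez.length : Int) 2 = 0 then sumE sez + vs else sumE sez),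
                 (if PySem.Int.mod (sez.length : Int) 2 = 0 then sumE sez.tail else sumE sez.tail + vs),
                 (if sez.head?.isNone then some vs else sez.head?),
                 1, (sez.length : Int) + 1) by
            simp [nic_ena_bloop, Ne.symm h]]
      have hstate :
          ((if PySem.Int.mod (sez.length : Int) 2 = 0 then sumE sez + vs else sumE sez),
           (if PySem.Int.mod (sez.length : Int) 2 = 0 then sumE sez.tail else sumE sez.tail + vs),
           (if sez.head?.isNone then some vs else sez.head?),
           (1 : Int), (sez.length : Int) + 1) =
          (sumE (sez ++ [vs]), sumE (sez ++ [vs]).tail, (sez ++ [vs]).head?, (1 : Int),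
           ((sez ++ [vs]).length : Int)) := by
        rw [sumE_append, sumO_append, mod_two_natCast, List.head?_append]
        simp only [Prod.mk.injEq]
        refine ⟨?_, ?_, ?_, trivial, by simp only [List.length_append, List.length_cons, List.length_nil]; push_cast; omega⟩
        · split_ifs with h1 h2 h2 <;> first | rfl | omega
        · split_ifs with h1 h2 h2 <;> first | rfl | omega
        · cases sez <;> simp
      rw [hstate]
      exact ih x (sez ++ [vs]) 1

lemma cons_case (x0 : Int) (rest : List Int) :
    nic_ena (x0 :: rest) = nic_ena_alt (x0 :: rest) := by
  have hloop' : nic_ena_bloop (x0 :: rest) x0 (0, 0, none, 0, 0) =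
      (sumE (nic_ena_aloop (x0 :: rest) x0 [] 0).1,
       sumE (nic_ena_aloop (x0 :: rest) x0 [] 0).1.tail,
       (nic_ena_aloop (x0 :: rest) x0 [] 0).1.head?,
       (nic_ena_aloop (x0 :: rest) x0 [] 0).2,
       ((nic_ena_aloop (x0 :: rest) x0 [] 0).1.length : Int)) :=
    loops_agree (x0 :: rest) x0 [] 0
  simp only [nic_ena, nic_ena_alt, hloop']
  generalize (nic_ena_aloop (x0 :: rest) x0 [] 0).1 = sezf
  generalize (nic_ena_aloop (x0 :: rest) x0 [] 0).2 = vsf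
  have hlen : (((sezf ++ [vsf]).length : Nat) : Int) = (sezf.length : Int) + 1 := by
    simp
  have hg0 : PySem.List.pyGetD (sezf ++ [vsf]) 0 0 = sezf.head?.getD vsf := by
    rw [PySem.List.pyGetD_zero]; cases sezf <;> simp
  have hsum2 : nic_ena_sum2 (sezf ++ [vsf]) 2 (((sezf ++ [vsf]).length : Nat) : Int)
      = sumE ((sezf ++ [vsf]).drop 2) := by
    have := sum2_drop (sezf ++ [vsf]).length (sezf ++ [vsf]) 2 (by omega)
    exact_mod_cast this
  have hsumE : sumE (sezf ++ [vsf])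
      = sezf.head?.getD vsf + sumE ((sezf ++ [vsf]).drop 2) := by
    cases sezf with
    | nil => simp [sumE]
    | cons h t =>
      rw [List.cons_append, sumE_cons]
      simp [List.drop_one]
  have hmid : nic_ena_sum2 (sezf ++ [vsf]) 1 ((sezf.length : Int)) = sumE sezf.tail := by
    have he : nic_ena_sum2 (sezf ++ [vsf]) 1 (sezf.length : Int)
        = nic_ena_sum2 sezf 1 (sezf.length : Int) := by
      unfold nic_ena_sum2
      refine congrArg List.sum (List.map_congr_left ?_)
      intro x hx
      rw [PySem.List.mem_pyRange_iff_of_pos (by norm_num)] at hx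
      obtain ⟨h1x, h2x, -⟩ := hx
      have hxlt : x < ((sezf ++ [vsf]).length : Int) := by simp; omega
      rw [PySem.List.pyGetD_eq_getElem (sezf ++ [vsf]) 0 (by omega) hxlt]
      rw [PySem.List.pyGetD_eq_getElem sezf 0 (by omega) (by omega)]
      exact List.getElem_append_left (by omega)
    rw [he]
    have := sum2_drop sezf.length sezf 1 (by omega)
    rw [show ((1 : Nat) : Int) = (1 : Int) by norm_cast] at this
    rw [this, List.drop_one]
  have hlast : PySem.List.pyGetD (sezf ++ [vsf]) ((sezf.length : Int)) 0 = vsf := by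
    rw [PySem.List.pyGetD_eq_getElem _ _ (by positivity) (by simp)]
    simp
  have hte : (if PySem.Int.mod ((sezf.length : Int)) 2 = 0 then sumE sezf + vsf else sumE sezf)
      = sumE (sezf ++ [vsf]) := by
    rw [sumE_append, mod_two_natCast]; split_ifs <;> first | rfl | omega
  have htacc : (if PySem.Int.mod ((sezf.length : Int)) 2 = 0 then sumE sezf.tail
        else sumE sezf.tail + vsf) = sumE ((sezf ++ [vsf]).tail) := by
    rw [sumO_append, mod_two_natCast]; split_ifs <;> first | rfl | omega
  have hsum2' : nic_ena_sum2 (sezf ++ [vsf]) 2 ((sezf.length : Int) + 1)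
      = sumE ((sezf ++ [vsf]).drop 2) := by rw [← hlen]; exact hsum2
  have htail : sumE ((sezf ++ [vsf]).tail)
      = (if sezf.length % 2 = 1 then sumE sezf.tail + vsf else sumE sezf.tail) :=
    sumO_append sezf vsf
  rw [hlen, show ((sezf.length : Int) + 1 - 1) = (sezf.length : Int) from by ring,
      hg0, hsum2', hmid, hlast, hte, htacc, htail, mod_two_natCast]
  rw [hsumE, min_def]
  split_ifs <;> omega

-- ===== VERDICT (by name: the statement is the Claim_ definition above) =====
theorem nic_ena_spec : Claim_equal_nic_ena := by
  intro xs _ hpre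
  unfold Spec_nic_ena
  match xs with
  | [] => exact absurd rfl hpre
  | x0 :: rest => exact cons_case x0 rest
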